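-- pv_equiv track=rewrite | github.com/hazlamahedich/shop | backend/app/services/intent/variation_maps.py | normalize_message
-- ===== SOURCE A (Python) =====
-- _FLAT_SYNONYM_MAP: dict[str, str] = {}
--
-- _FLAT_BRAND_MAP: dict[str, str] = {}
--
-- _FLAT_TYPO_MAP: dict[str, str] = {}
--
-- _MAX_NORMALIZE_LENGTH = 300
--
-- def normalize_message(message: str) -> str:
--     text = message.lower().strip()
--
--     if len(text) > _MAX_NORMALIZE_LENGTH:
--         text = text[:_MAX_NORMALIZE_LENGTH]
--
--     words = text.split()
--     replaced = []
--     for word in words: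
--         stripped = word.strip(".,!?;:'\"()")
--         if stripped in _FLAT_TYPO_MAP:
--             replaced.append(_FLAT_TYPO_MAP[stripped])
--         elif stripped in _FLAT_SYNONYM_MAP:
--             replaced.append(_FLAT_SYNONYM_MAP[stripped])
--         elif stripped in _FLAT_BRAND_MAP:
--             replaced.append(_FLAT_BRAND_MAP[stripped])
--         else:
--             replaced.append(word)
--
--     return " ".join(replaced)
-- ===== SOURCE B (Python) =====
-- def normalize_message(message: str) -> str:
--     # All three replacement maps are empty, so normalization reduces to
--     # lowercasing, stripping, truncating to 300 chars and collapsing whitespace.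
--     return " ".join(message.lower().strip()[:300].split())
-- ===== Notes on version B (the rewrite author's own statement) =====
-- stated objective: simpler
-- what changed: All three replacement dicts are empty, so the per-word loop with punctuation-stripping and three dict lookups is replaced by a one-line lower/strip/truncate/split/join pipeline (truncation done unconditionally by slicing).
import Mathlib
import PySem

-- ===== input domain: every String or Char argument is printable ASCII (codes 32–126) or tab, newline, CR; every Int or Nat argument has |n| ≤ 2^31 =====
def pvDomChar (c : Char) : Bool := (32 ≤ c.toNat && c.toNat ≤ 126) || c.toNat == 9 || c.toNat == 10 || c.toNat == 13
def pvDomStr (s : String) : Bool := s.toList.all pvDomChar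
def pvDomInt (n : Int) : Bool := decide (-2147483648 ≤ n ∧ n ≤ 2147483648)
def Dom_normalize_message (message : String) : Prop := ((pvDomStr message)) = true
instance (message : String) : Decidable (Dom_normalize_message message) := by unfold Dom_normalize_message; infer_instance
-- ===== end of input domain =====

-- B replaces A's per-word loop with three (empty) dict lookups by one
-- lower/strip/truncate/split/join pipeline; objective: simpler.

-- ===== PORT A =====
def pvFlatSynonymMap : PySem.Dict String String := PySem.Dict.empty
def pvFlatBrandMap : PySem.Dict String String := PySem.Dict.empty
def pvFlatTypoMap : PySem.Dict String String := PySem.Dict.empty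
def pvMaxNormalizeLength : Int := 300

def normalize_message (message : String) : String :=
  let text := PySem.Str.strip (PySem.Str.lower message)
  let text := if PySem.Str.len text > pvMaxNormalizeLength then
      PySem.Str.slice text none (some pvMaxNormalizeLength) else text
  let words := PySem.Str.split₀ text
  let replaced := words.foldl (fun acc word =>
    let stripped := PySem.Str.stripChars word ".,!?;:'\"()"
    match PySem.Dict.get? pvFlatTypoMap stripped with
    | some v => acc ++ [v]
    | none =>
      match PySem.Dict.get? pvFlatSynonymMap stripped with
      | some v => acc ++ [v]
      | none =>
        match PySem.Dict.get? pvFlatBrandMap stripped with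
        | some v => acc ++ [v]
        | none => acc ++ [word]) []
  PySem.Str.join " " replaced

-- ===== PORT B =====
def normalize_message_alt (message : String) : String :=
  PySem.Str.join " "
    (PySem.Str.split₀
      (PySem.Str.slice (PySem.Str.strip (PySem.Str.lower message)) none (some 300)))

-- ===== PRECONDITION & SPEC =====
def Spec_normalize_message (message : String) (out : String) : Prop := out = normalize_message_alt message
instance (message : String) (out : String) : Decidable (Spec_normalize_message message out) := by unfold Spec_normalize_message; infer_instance

-- ===== CLAIM (what is proved, stated in full; the proofs are below) =====
def Claim_equal_normalize_message : Prop := ∀ (message : String), Dom_normalize_message message → Spec_normalize_message message (normalize_message message)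

-- ===== LEMMAS AND PROOFS =====

-- A's loop over empty maps just rebuilds the word list.
theorem pv_foldl_id (ws acc : List String) :
    ws.foldl (fun acc word =>
      let stripped := PySem.Str.stripChars word ".,!?;:'\"()"
      match PySem.Dict.get? pvFlatTypoMap stripped with
      | some v => acc ++ [v]
      | none =>
        match PySem.Dict.get? pvFlatSynonymMap stripped with
        | some v => acc ++ [v]
        | none =>
          match PySem.Dict.get? pvFlatBrandMap stripped with
          | some v => acc ++ [v]
          | none => acc ++ [word]) acc = acc ++ ws := by
  induction ws generalizing acc with
  | nil => simp
  | cons w ws ih =>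
    simp only [List.foldl_cons]
    rw [show (PySem.Dict.get? pvFlatTypoMap (PySem.Str.stripChars w ".,!?;:'\"()")) = none from rfl]
    rw [show (PySem.Dict.get? pvFlatSynonymMap (PySem.Str.stripChars w ".,!?;:'\"()")) = none from rfl]
    rw [show (PySem.Dict.get? pvFlatBrandMap (PySem.Str.stripChars w ".,!?;:'\"()")) = none from rfl]
    simp only []
    rw [ih]
    simp

-- truncating at 300 is a no-op for strings of length ≤ 300
theorem pv_slice_short (s : String) (h : ¬ PySem.Str.len s > (300 : Int)) :
    PySem.Str.slice s none (some 300) = s := by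
  have hlen : s.toList.length ≤ 300 := by
    have := PySem.Str.len_eq s
    omega
  have h3 : ((300 : Int)) = ((300 : Nat) : Int) := by norm_num
  apply String.toList_inj.mp
  rw [PySem.Str.toList_slice]
  simp only [PySem.Chars.slice_eq_listSlice]
  rw [h3, PySem.List.slice_to_natCast]
  exact List.take_of_length_le hlen

-- ===== VERDICT (by name: the statement is the Claim_ definition above) =====
theorem normalize_message_spec : Claim_equal_normalize_message := by
  intro message _
  unfold Spec_normalize_message normalize_message normalize_message_alt
  simp only [pvMaxNormalizeLength]
  set t := PySem.Str.strip (PySem.Str.lower message) with ht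
  by_cases h : PySem.Str.len t > (300 : Int)
  · simp only [if_pos h, pv_foldl_id]
    simp
  · simp only [if_neg h, pv_foldl_id, pv_slice_short t h]
    simp
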